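-- pv_equiv track=rewrite | github.com/dkfptm335/Code_Study | Previous Files/Programmers(~20240312)/Lv. 1/연습문제/문자열 나누기.py | solution
-- ===== SOURCE A (Python) =====
-- def solution(s):
--     splited = 0
--
--     same = 0
--     diff = 0
--
--     for char in s:
--         if same == diff:
--             splited += 1
--             same = 0
--             diff = 0
--             x = char
--
--         if x == char:
--             same += 1
--         else:
--             diff += 1
--
--
--     return splited
-- ===== SOURCE B (Python) =====
-- def solution(s):
--     count = 0
--     it = iter(s)
--     for head in it:
--         same, diff = 1, 0
--         for ch in it:
--             if ch == head:
--                 same += 1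
--             else:
--                 diff += 1
--             if same == diff:
--                 break
--         count += 1
--     return count
-- ===== Notes on version B (the rewrite author's own statement) =====
-- stated objective: alternative
-- what changed: B is a segment-at-a-time nested loop over one shared iterator: the outer loop pulls each segment's head char and counts a segment, the inner loop consumes chars until the segment balances, instead of A's single flat pass with a reset-on-boundary state machine that counts segment starts.
import Mathlib
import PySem

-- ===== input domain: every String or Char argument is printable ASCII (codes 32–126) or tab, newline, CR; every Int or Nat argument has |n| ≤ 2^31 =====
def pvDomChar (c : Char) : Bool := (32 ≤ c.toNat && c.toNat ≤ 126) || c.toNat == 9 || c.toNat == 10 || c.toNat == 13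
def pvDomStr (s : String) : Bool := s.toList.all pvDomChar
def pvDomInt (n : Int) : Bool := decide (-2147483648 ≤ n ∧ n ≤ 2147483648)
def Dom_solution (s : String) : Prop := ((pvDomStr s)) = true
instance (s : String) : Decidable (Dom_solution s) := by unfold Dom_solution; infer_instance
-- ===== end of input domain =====

-- B restructures A's flat reset-on-boundary state machine into a segment-at-a-time nested
-- loop over one shared iterator (outer: one segment per iteration; inner: close the segment);
-- an alternative decomposition, same cost.

-- ===== PORT A =====
-- state: (splited, same, diff, x); x's initial value is never read (A sets x before first use)
def solutionStep (st : Int × Int × Int × Char) (c : Char) : Int × Int × Int × Char :=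
  let (sp, same, diff, x) := st
  let (sp, same, diff, x) := if same == diff then (sp + 1, (0 : Int), (0 : Int), c) else (sp, same, diff, x)
  if x == c then (sp, same + 1, diff, x) else (sp, same, diff + 1, x)

def solution (s : String) : Int :=
  (s.toList.foldl solutionStep (0, 0, 0, 'a')).1

-- ===== PORT B =====
-- inner 'for ch in it: … break': consumes chars of the shared iterator (the list suffix)
-- until the segment balances; returns what is left of the iterator.
def scanSeg (head : Char) (same diff : Int) : List Char → List Char
  | [] => []
  | c :: t =>
      let (same', diff') := if c == head then (same + 1, diff) else (same, diff + 1)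
      if same' == diff' then t else scanSeg head same' diff' t

-- the remaining iterator never grows (for termination of the outer loop)
lemma scanSeg_length_le (head : Char) : ∀ (l : List Char) (same diff : Int),
    (scanSeg head same diff l).length ≤ l.length := by
  intro l
  induction l with
  | nil => intro same diff; simp [scanSeg]
  | cons c t ih =>
      intro same diff
      simp only [scanSeg]
      by_cases h : c = head <;> simp [h] <;> split <;>
        first
          | simp
          | exact Nat.le_succ_of_le (ih _ _)

-- outer 'for head in it': one iteration per segment
def solGo : List Char → Int
  | [] => 0
  | c :: t => solGo (scanSeg c 1 0 t) + 1
  termination_by l => l.length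
  decreasing_by exact Nat.lt_succ_of_le (scanSeg_length_le c t 1 0)

def solution_alt (s : String) : Int := solGo s.toList

-- ===== PRECONDITION & SPEC =====
def Spec_solution (s : String) (out : Int) : Prop := out = solution_alt s
instance (s : String) (out : Int) : Decidable (Spec_solution s out) := by unfold Spec_solution; infer_instance

-- ===== CLAIM (what is proved, stated in full; the proofs are below) =====
def Claim_equal_solution : Prop := ∀ (s : String), Dom_solution s → Spec_solution s (solution s)

-- ===== LEMMAS AND PROOFS =====

-- mid-segment: A's fold from a non-boundary state equals sp plus B's count of the rest of the
-- segment's remainder, provided the boundary lemma (H) holds for all lists no longer than t.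
lemma mid_seg (t : List Char)
    (H : ∀ l', l'.length ≤ t.length → ∀ (sp same diff : Int) (x : Char), same = diff →
         (List.foldl solutionStep (sp, same, diff, x) l').1 = sp + solGo l') :
    ∀ (sp same diff : Int) (x : Char), same ≠ diff →
      (List.foldl solutionStep (sp, same, diff, x) t).1 = sp + solGo (scanSeg x same diff t) := by
  induction t with
  | nil => intro sp same diff x hne; simp [scanSeg, solGo]
  | cons c t ih =>
      intro sp same diff x hne
      have H' : ∀ l', l'.length ≤ t.length → ∀ (sp same diff : Int) (x : Char), same = diff →
          (List.foldl solutionStep (sp, same, diff, x) l').1 = sp + solGo l' :=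
        fun l' hl' => H l' (Nat.le_succ_of_le hl')
      have hne' : ¬ ((same : Int) == diff) = true := by simpa using hne
      rw [List.foldl_cons]
      by_cases hxc : x = c
      · have hstep : solutionStep (sp, same, diff, x) c = (sp, same + 1, diff, x) := by
          simp [solutionStep, hne', hxc]
        have hscan : scanSeg x same diff (c :: t) =
            if ((same + 1 : Int) == diff) = true then t else scanSeg x (same + 1) diff t := by
          simp [scanSeg, hxc.symm]
        rw [hstep, hscan]
        by_cases hb : (same + 1 : Int) = diff
        · rw [if_pos (by simpa using hb)]
          exact H t (Nat.le_succ _) sp (same + 1) diff x hb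
        · rw [if_neg (by simpa using hb)]
          exact ih H' sp (same + 1) diff x hb
      · have hstep : solutionStep (sp, same, diff, x) c = (sp, same, diff + 1, x) := by
          simp [solutionStep, hne', hxc]
        have hcx : (c == x) = false := by
          simpa using fun h => hxc h.symm
        have hscan : scanSeg x same diff (c :: t) =
            if ((same : Int) == diff + 1) = true then t else scanSeg x same (diff + 1) t := by
          simp [scanSeg, hcx]
        rw [hstep, hscan]
        by_cases hb : (same : Int) = diff + 1
        · rw [if_pos (by simpa using hb)]
          exact H t (Nat.le_succ _) sp same (diff + 1) x hb
        · rw [if_neg (by simpa using hb)]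
          exact ih H' sp same (diff + 1) x hb

-- boundary: from a state with same = diff, A's fold counts sp plus B's segment count of l.
lemma boundary : ∀ (n : Nat) (l : List Char), l.length ≤ n →
    ∀ (sp same diff : Int) (x : Char), same = diff →
      (List.foldl solutionStep (sp, same, diff, x) l).1 = sp + solGo l := by
  intro n
  induction n with
  | zero =>
      intro l hl sp same diff x he
      have : l = [] := List.eq_nil_of_length_eq_zero (Nat.le_zero.mp hl)
      subst this; simp [solGo]
  | succ n ih =>
      intro l hl sp same diff x he
      cases l with
      | nil => simp [solGo]
      | cons c t =>
          have hstep : solutionStep (sp, same, diff, x) c = (sp + 1, 1, 0, c) := by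
            simp [solutionStep, he]
          rw [List.foldl_cons, hstep, solGo]
          have ht : t.length ≤ n := by simpa using hl
          have := mid_seg t (fun l' hl' => ih l' (Nat.le_trans hl' ht)) (sp + 1) 1 0 c (by norm_num)
          rw [this]; ring

-- ===== VERDICT (by name: the statement is the Claim_ definition above) =====
theorem solution_spec : Claim_equal_solution := by
  intro s _
  unfold Spec_solution solution solution_alt
  have := boundary s.toList.length s.toList (Nat.le_refl _) 0 0 0 'a' rfl
  simpa using this
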